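-- pv_equiv track=rewrite | github.com/AdityaKumbhar21/Python_DSA | 01_Array/05_remove_duplicates.py | removeDuplicates_brute
-- ===== SOURCE A (Python) =====
-- def removeDuplicates_brute(nums):
--         temp = [nums[0]]
--
--         n = len(nums)
--         for i in range(1,n):
--             if nums[i] != nums[i-1]:  # for checking the first occurence of the element
--                 temp.append(nums[i])
--
--         for i in range(0, len(temp)):
--          nums[i] = temp[i]
--
--         return len(temp)
-- ===== SOURCE B (Python) =====
-- def removeDuplicates_brute(nums):
--     if not nums:
--         return 0
--     j = 1
--     for i in range(1, len(nums)):
--         if nums[i] != nums[i - 1]: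
--             nums[j] = nums[i]
--             j += 1
--     return j
-- ===== Notes on version B (the rewrite author's own statement) =====
-- stated objective: alternative
-- what changed: Replaces A's auxiliary temp list plus a second copy-back loop with a single-pass in-place two-pointer dedup that maintains only a write index.
import Mathlib
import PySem

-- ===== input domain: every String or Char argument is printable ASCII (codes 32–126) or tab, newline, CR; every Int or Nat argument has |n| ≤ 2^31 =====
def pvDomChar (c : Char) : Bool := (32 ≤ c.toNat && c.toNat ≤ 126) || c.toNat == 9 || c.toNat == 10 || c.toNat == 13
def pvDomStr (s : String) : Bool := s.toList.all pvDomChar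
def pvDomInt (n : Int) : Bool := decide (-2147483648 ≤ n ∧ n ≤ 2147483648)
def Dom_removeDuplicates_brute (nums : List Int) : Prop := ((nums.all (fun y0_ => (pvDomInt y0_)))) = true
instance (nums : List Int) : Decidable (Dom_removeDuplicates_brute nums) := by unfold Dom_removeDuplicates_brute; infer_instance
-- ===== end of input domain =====

-- B replaces A's temp list + copy-back loop by a single-pass in-place two-pointer dedup
-- (same return value and same in-place mutation of nums; Pre_ excludes the empty list, where A raises IndexError).


-- ===== PORT A =====
-- body of A's first for-loop: append nums[i] to temp when nums[i] != nums[i-1]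
def bruteStep (nums : List Int) (temp : List Int) (i : Int) : List Int :=
  if PySem.List.pyGetD nums i 0 ≠ PySem.List.pyGetD nums (i-1) 0
  then temp ++ [PySem.List.pyGetD nums i 0] else temp

def removeDuplicates_brute (nums : List Int) : Int :=
  match PySem.List.pyGet? nums 0 with
  | none => 0  -- IndexError on empty nums; excluded by Pre_
  | some x0 =>
    let n : Int := (nums.length : Int)
    let temp := (PySem.List.pyRange 1 n 1).foldl (bruteStep nums) [x0]
    -- A's second loop copies temp back into nums (in-place mutation, no effect on the return value)
    (temp.length : Int)

-- ===== PORT B =====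
-- body of B's loop; state st = (nums, j): write nums[j] := nums[i] and bump j on a new value
def twoPtrStep (st : List Int × Int) (i : Int) : List Int × Int :=
  if PySem.List.pyGetD st.1 i 0 ≠ PySem.List.pyGetD st.1 (i-1) 0
  then (PySem.List.pySetD st.1 st.2 (PySem.List.pyGetD st.1 i 0), st.2 + 1)
  else st

def removeDuplicates_brute_alt (nums : List Int) : Int :=
  if nums = [] then 0
  else ((PySem.List.pyRange 1 (nums.length : Int) 1).foldl twoPtrStep (nums, 1)).2

-- ===== PRECONDITION & SPEC =====
-- Pre_ excludes only the empty list, on which A raises IndexError at nums[0].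
def Pre_removeDuplicates_brute (nums : List Int) : Prop := nums ≠ []
instance (nums : List Int) : Decidable (Pre_removeDuplicates_brute nums) := by unfold Pre_removeDuplicates_brute; infer_instance
def pvWitness_removeDuplicates_brute : List Int := [1, 1, 2]

def Spec_removeDuplicates_brute (nums : List Int) (out : Int) : Prop := out = removeDuplicates_brute_alt nums
instance (nums : List Int) (out : Int) : Decidable (Spec_removeDuplicates_brute nums out) := by unfold Spec_removeDuplicates_brute; infer_instance

-- ===== CLAIM (what is proved, stated in full; the proofs are below) =====
def Claim_equal_removeDuplicates_brute : Prop := ∀ (nums : List Int), Dom_removeDuplicates_brute nums → Pre_removeDuplicates_brute nums → Spec_removeDuplicates_brute nums (removeDuplicates_brute nums)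

-- ===== LEMMAS AND PROOFS =====

-- reading an untouched position of a written list
lemma pyGetD_pySetD_ne (xs : List Int) (i m : Int) (v d : Int)
    (h0i : 0 ≤ i) (h0m : 0 ≤ m) (hm : m < (xs.length : Int)) (hne : i ≠ m) :
    PySem.List.pyGetD (PySem.List.pySetD xs i v) m d = PySem.List.pyGetD xs m d := by
  rw [PySem.List.pySetD_of_nonneg xs v h0i]
  rw [PySem.List.pyGetD_eq_getElem _ _ h0m (by simpa using hm),
      PySem.List.pyGetD_eq_getElem _ _ h0m (by simpa using hm)]
  exact List.getElem_set_ne (by omega) _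

-- loop invariant: after processing indices 1..k-1, B's write pointer equals the length of A's temp,
-- and B's partially overwritten list still agrees with nums at every index ≥ the write pointer
-- (moreover it is exactly nums while the pointer has kept pace with k).
lemma twoPtr_inv (nums : List Int) (k : Nat) (hk1 : 1 ≤ k) (hk : k ≤ nums.length) :
    let st := (PySem.List.pyRange 1 (k : Int) 1).foldl twoPtrStep (nums, 1)
    let temp := (PySem.List.pyRange 1 (k : Int) 1).foldl (bruteStep nums) [PySem.List.pyGetD nums 0 0]
    st.2 = (temp.length : Int) ∧ 1 ≤ st.2 ∧ st.2 ≤ (k : Int) ∧ st.1.length = nums.length ∧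
    (∀ m : Int, st.2 ≤ m → m < (nums.length : Int) → PySem.List.pyGetD st.1 m 0 = PySem.List.pyGetD nums m 0) ∧
    (st.2 = (k : Int) → st.1 = nums) := by
  induction k with
  | zero => omega
  | succ k ih =>
    by_cases hk0 : k = 0
    · subst hk0
      simp [PySem.List.pyRange_one_eq_nil (by omega : (1:Int) ≥ 1)]
    · have hk1' : 1 ≤ k := by omega
      have hkl : k ≤ nums.length := by omega
      have hklt : (k : Int) < (nums.length : Int) := by exact_mod_cast hk
      obtain ⟨ih1, ih2, ih3, ih4, ih5, ih6⟩ := ih hk1' hkl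
      intro st' temp'
      have hrange : PySem.List.pyRange 1 ((k+1 : Nat) : Int) 1
          = PySem.List.pyRange 1 (k : Int) 1 ++ [(k : Int)] := by
        push_cast
        exact PySem.List.pyRange_one_succ_right (by exact_mod_cast hk1')
      set st := (PySem.List.pyRange 1 (k : Int) 1).foldl twoPtrStep (nums, 1) with hst
      set temp := (PySem.List.pyRange 1 (k : Int) 1).foldl (bruteStep nums) [PySem.List.pyGetD nums 0 0] with htemp
      have hst' : st' = twoPtrStep st (k : Int) := by
        simp only [st', hrange, List.foldl_append, List.foldl_cons, List.foldl_nil, hst]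
      have htemp' : temp' = bruteStep nums temp (k : Int) := by
        simp only [temp', hrange, List.foldl_append, List.foldl_cons, List.foldl_nil, htemp]
      -- the two reads of B's loop see the original values
      have hreadk : PySem.List.pyGetD st.1 (k : Int) 0 = PySem.List.pyGetD nums (k : Int) 0 :=
        ih5 (k : Int) ih3 hklt
      have hreadk1 : PySem.List.pyGetD st.1 ((k : Int) - 1) 0 = PySem.List.pyGetD nums ((k : Int) - 1) 0 := by
        by_cases hje : st.2 = (k : Int)
        · rw [ih6 hje]
        · exact ih5 ((k : Int) - 1) (by omega) (by omega)
      rw [hst', htemp']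
      unfold twoPtrStep bruteStep
      rw [hreadk, hreadk1]
      by_cases hcond : PySem.List.pyGetD nums (k : Int) 0 ≠ PySem.List.pyGetD nums ((k : Int) - 1) 0
      · simp only [if_pos hcond]
        refine ⟨?_, ?_, ?_, ?_, ?_, ?_⟩
        · show st.2 + 1 = ((temp ++ [PySem.List.pyGetD nums (k : Int) 0]).length : Int)
          simp only [List.length_append, List.length_singleton]
          omega
        · show 1 ≤ st.2 + 1
          omega
        · show st.2 + 1 ≤ ((k+1 : Nat) : Int)
          omega
        · show (PySem.List.pySetD st.1 st.2 (PySem.List.pyGetD nums (k : Int) 0)).length = nums.length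
          rw [PySem.List.length_pySetD, ih4]
        · intro m hm hmlt
          replace hm : st.2 + 1 ≤ m := hm
          show PySem.List.pyGetD (PySem.List.pySetD st.1 st.2 (PySem.List.pyGetD nums (k : Int) 0)) m 0 = _
          rw [pyGetD_pySetD_ne st.1 st.2 m _ 0 (by omega) (by omega) (by rw [ih4]; omega) (by omega)]
          exact ih5 m (by omega) hmlt
        · intro hj
          replace hj : st.2 + 1 = ((k+1 : Nat) : Int) := hj
          have hje : st.2 = (k : Int) := by push_cast at hj; omega
          show PySem.List.pySetD st.1 st.2 (PySem.List.pyGetD nums (k : Int) 0) = nums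
          rw [ih6 hje]
          rw [PySem.List.pyGetD_eq_getElem nums 0 (by omega) hklt]
          rw [PySem.List.pySetD_of_nonneg nums _ (by omega : (0:Int) ≤ st.2), hje]
          simp
      · simp only [if_neg hcond]
        refine ⟨ih1, ih2, by push_cast; omega, ih4, ih5, ?_⟩
        intro hj
        replace hj : st.2 = ((k+1 : Nat) : Int) := hj
        have : ((k : Nat) + 1 : Int) = (k : Int) + 1 := by push_cast; ring
        omega

-- ===== VERDICT (by name: the statement is the Claim_ definition above) =====
theorem removeDuplicates_brute_spec : Claim_equal_removeDuplicates_brute := by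
  intro nums _ hpre
  unfold Spec_removeDuplicates_brute removeDuplicates_brute removeDuplicates_brute_alt
  have hlen : 0 < nums.length := List.length_pos_of_ne_nil hpre
  have hget : PySem.List.pyGet? nums 0 = some nums[0] := by
    rw [show (0 : Int) = ((0 : Nat) : Int) by norm_num, PySem.List.pyGet?_natCast]
    simp [List.getElem?_eq_getElem hlen]
  rw [hget, if_neg hpre]
  obtain ⟨h1, _, _, _, _, _⟩ := twoPtr_inv nums nums.length (by omega) (le_refl _)
  have hinit : PySem.List.pyGetD nums (0 : Int) 0 = nums[0] := by
    rw [PySem.List.pyGetD_eq_getElem nums 0 (le_refl 0) (by exact_mod_cast hlen)]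
    simp
  rw [← hinit]
  exact h1.symm
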